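-- pv_equiv track=rewrite | github.com/zwaiu/Nsd | main.py | parse_stripe_response
-- ===== SOURCE A (Python) =====
-- def parse_stripe_response(response_text):
--     resp_lower = response_text.lower()
--
--     # ONLY REAL CVV LIVE - Transaction succeeded
--     if any(msg in resp_lower for msg in ["succeeded", "payment complete", "setup_intent_succeeded"]):
--         return {'status': 'cvv_live', 'rawMessage': 'CVV LIVE: Transaction Succeeded'}
--
--     # ONLY REAL CCN LIVE - Wrong CVV but valid card
--     if any(msg in resp_lower for msg in ["incorrect_cvc", "security code is incorrect"]):
--         return {'status': 'ccn_live', 'rawMessage': 'CCN LIVE: Incorrect CVC'}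
--
--     # EVERYTHING ELSE IS DECLINED (including insufficient funds and 3ds/otp)
--     if any(msg in resp_lower for msg in ["insufficient_funds", "3ds", "authentication", "otp", "verification", "challenge"]):
--         return {'status': 'declined', 'rawMessage': 'Declined'}
--
--     if any(msg in resp_lower for msg in ["address_zip_check", "postal_code_invalid"]):
--         return {'status': 'declined', 'rawMessage': 'Declined: AVS Mismatch'}
--
--     if any(msg in resp_lower for msg in ["card_declined", "declined", "do_not_honor", "do not honor", "not honored"]):
--         return {'status': 'declined', 'rawMessage': 'Declined: Card declined'}
--
--     if any(msg in resp_lower for msg in ["invalid_number", "invalid card", "incorrect_number"]):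
--         return {'status': 'declined', 'rawMessage': 'Declined: Invalid card number'}
--
--     if any(msg in resp_lower for msg in ["expired_card", "expired"]):
--         return {'status': 'declined', 'rawMessage': 'Declined: Card expired'}
--
--     if any(msg in resp_lower for msg in ["pickup_card", "stolen_card", "lost_card"]):
--         return {'status': 'declined', 'rawMessage': 'Declined: Card reported lost/stolen'}
--
--     # DEFAULT TO DECLINED
--     return {'status': 'declined', 'rawMessage': 'Declined: No positive indicators'}
-- ===== SOURCE B (Python) =====
-- # Different strategy: a flat keyword->priority map; classify by the MINIMUM
-- # priority among all keywords present (order-independent), then index a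
-- # single outcome table; no ordered rule traversal or early-return cascade.
-- KEYWORD_PRIORITY = {
--     "succeeded": 0, "payment complete": 0, "setup_intent_succeeded": 0,
--     "incorrect_cvc": 1, "security code is incorrect": 1,
--     "insufficient_funds": 2, "3ds": 2, "authentication": 2, "otp": 2,
--     "verification": 2, "challenge": 2,
--     "address_zip_check": 3, "postal_code_invalid": 3,
--     "card_declined": 4, "declined": 4, "do_not_honor": 4,
--     "do not honor": 4, "not honored": 4,
--     "invalid_number": 5, "invalid card": 5, "incorrect_number": 5,
--     "expired_card": 6, "expired": 6,
--     "pickup_card": 7, "stolen_card": 7, "lost_card": 7,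
-- }
-- OUTCOMES = [
--     ('cvv_live', 'CVV LIVE: Transaction Succeeded'),
--     ('ccn_live', 'CCN LIVE: Incorrect CVC'),
--     ('declined', 'Declined'),
--     ('declined', 'Declined: AVS Mismatch'),
--     ('declined', 'Declined: Card declined'),
--     ('declined', 'Declined: Invalid card number'),
--     ('declined', 'Declined: Card expired'),
--     ('declined', 'Declined: Card reported lost/stolen'),
--     ('declined', 'Declined: No positive indicators'),
-- ]
--
-- def parse_stripe_response(response_text):
--     low = response_text.lower()
--     best = min((p for kw, p in KEYWORD_PRIORITY.items() if kw in low),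
--                default=len(OUTCOMES) - 1)
--     status, raw = OUTCOMES[best]
--     return {'status': status, 'rawMessage': raw}
-- ===== Notes on version B (the rewrite author's own statement) =====
-- stated objective: alternative
-- what changed: Replaces the ordered eight-branch keyword-group cascade with a flat keyword-to-priority map: B scans all keywords once, takes the minimum priority among those present (order-independent), and indexes a single outcome table.
import Mathlib
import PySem

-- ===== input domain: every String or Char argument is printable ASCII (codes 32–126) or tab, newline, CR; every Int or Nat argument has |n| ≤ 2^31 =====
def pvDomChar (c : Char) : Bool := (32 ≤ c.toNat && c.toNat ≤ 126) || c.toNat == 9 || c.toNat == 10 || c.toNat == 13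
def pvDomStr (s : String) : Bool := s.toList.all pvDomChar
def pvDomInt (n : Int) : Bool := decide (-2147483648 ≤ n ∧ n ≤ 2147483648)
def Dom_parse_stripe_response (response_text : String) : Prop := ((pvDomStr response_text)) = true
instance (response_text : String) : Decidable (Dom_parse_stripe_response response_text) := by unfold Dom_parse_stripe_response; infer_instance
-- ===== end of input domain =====

-- B replaces the ordered keyword-group cascade by a flat keyword→priority map:
-- minimum priority among keywords present, then one outcome-table lookup.
-- ===== PORT A =====
def parse_stripe_response (response_text : String) : List (String × String) :=
  let resp_lower := PySem.Str.lower response_text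
  if ["succeeded", "payment complete", "setup_intent_succeeded"].any (fun msg => PySem.Str.isIn msg resp_lower) then
    [("status", "cvv_live"), ("rawMessage", "CVV LIVE: Transaction Succeeded")]
  else if ["incorrect_cvc", "security code is incorrect"].any (fun msg => PySem.Str.isIn msg resp_lower) then
    [("status", "ccn_live"), ("rawMessage", "CCN LIVE: Incorrect CVC")]
  else if ["insufficient_funds", "3ds", "authentication", "otp", "verification", "challenge"].any (fun msg => PySem.Str.isIn msg resp_lower) then
    [("status", "declined"), ("rawMessage", "Declined")]
  else if ["address_zip_check", "postal_code_invalid"].any (fun msg => PySem.Str.isIn msg resp_lower) then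
    [("status", "declined"), ("rawMessage", "Declined: AVS Mismatch")]
  else if ["card_declined", "declined", "do_not_honor", "do not honor", "not honored"].any (fun msg => PySem.Str.isIn msg resp_lower) then
    [("status", "declined"), ("rawMessage", "Declined: Card declined")]
  else if ["invalid_number", "invalid card", "incorrect_number"].any (fun msg => PySem.Str.isIn msg resp_lower) then
    [("status", "declined"), ("rawMessage", "Declined: Invalid card number")]
  else if ["expired_card", "expired"].any (fun msg => PySem.Str.isIn msg resp_lower) then
    [("status", "declined"), ("rawMessage", "Declined: Card expired")]
  else if ["pickup_card", "stolen_card", "lost_card"].any (fun msg => PySem.Str.isIn msg resp_lower) then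
    [("status", "declined"), ("rawMessage", "Declined: Card reported lost/stolen")]
  else
    [("status", "declined"), ("rawMessage", "Declined: No positive indicators")]

-- ===== PORT B =====
-- Source B's KEYWORD_PRIORITY dict (keys distinct, insertion order)
def pvKeywordPriority : List (String × Nat) :=
  [("succeeded", 0), ("payment complete", 0), ("setup_intent_succeeded", 0),
   ("incorrect_cvc", 1), ("security code is incorrect", 1),
   ("insufficient_funds", 2), ("3ds", 2), ("authentication", 2), ("otp", 2),
   ("verification", 2), ("challenge", 2),
   ("address_zip_check", 3), ("postal_code_invalid", 3),
   ("card_declined", 4), ("declined", 4), ("do_not_honor", 4),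
   ("do not honor", 4), ("not honored", 4),
   ("invalid_number", 5), ("invalid card", 5), ("incorrect_number", 5),
   ("expired_card", 6), ("expired", 6),
   ("pickup_card", 7), ("stolen_card", 7), ("lost_card", 7)]

-- Source B's OUTCOMES table
def pvOutcomes : List (String × String) :=
  [("cvv_live", "CVV LIVE: Transaction Succeeded"),
   ("ccn_live", "CCN LIVE: Incorrect CVC"),
   ("declined", "Declined"),
   ("declined", "Declined: AVS Mismatch"),
   ("declined", "Declined: Card declined"),
   ("declined", "Declined: Invalid card number"),
   ("declined", "Declined: Card expired"),
   ("declined", "Declined: Card reported lost/stolen"),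
   ("declined", "Declined: No positive indicators")]

def parse_stripe_response_alt (response_text : String) : List (String × String) :=
  let low := PySem.Str.lower response_text
  -- min(..., default=len(OUTCOMES)-1) over the matching keywords, as a fold
  let best := pvKeywordPriority.foldl
    (fun b p => if PySem.Str.isIn p.1 low then min b p.2 else b) (pvOutcomes.length - 1)
  -- OUTCOMES[best]: best ≤ 8 < 9 always, so getD is exactly Python's indexing here
  let sr := pvOutcomes.getD best ("", "")
  [("status", sr.1), ("rawMessage", sr.2)]

-- ===== PRECONDITION & SPEC =====
def Spec_parse_stripe_response (response_text : String) (out : List (String × String)) : Prop := out = parse_stripe_response_alt response_text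
instance (response_text : String) (out : List (String × String)) : Decidable (Spec_parse_stripe_response response_text out) := by unfold Spec_parse_stripe_response; infer_instance

-- ===== CLAIM (what is proved, stated in full; the proofs are below) =====
def Claim_equal_parse_stripe_response : Prop := ∀ (response_text : String), Dom_parse_stripe_response response_text → Spec_parse_stripe_response response_text (parse_stripe_response response_text)

-- ===== LEMMAS AND PROOFS =====

-- folding the min step over a segment of keywords that all carry the same
-- priority g is: min acc g if any keyword matches, else acc
theorem pv_group_fold (t : String) (g : Nat) (kws : List String) (acc : Nat) :
    List.foldl (fun b p => if PySem.Str.isIn p.1 t then min b p.2 else b) acc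
      (kws.map (fun k => (k, g)))
      = if kws.any (fun k => PySem.Str.isIn k t) then min acc g else acc := by
  induction kws generalizing acc with
  | nil => simp
  | cons k rest ih =>
    simp only [List.map_cons, List.foldl_cons, List.any_cons]
    by_cases h : PySem.Str.isIn k t
    · have hc : (PySem.Str.isIn k t || rest.any fun k => PySem.Str.isIn k t) = true := by
        rw [h]; exact Bool.true_or _
      rw [if_pos h, ih, if_pos hc]
      split
      · rw [Nat.min_assoc, Nat.min_self]
      · rfl
    · rw [if_neg h, ih]
      simp only [Bool.not_eq_true] at h
      simp only [h, Bool.false_or]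

-- the flat table is the concatenation of the eight priority groups
theorem pv_table_split :
    pvKeywordPriority =
      (["succeeded", "payment complete", "setup_intent_succeeded"].map (fun k => (k, 0))) ++
      (["incorrect_cvc", "security code is incorrect"].map (fun k => (k, 1))) ++
      (["insufficient_funds", "3ds", "authentication", "otp", "verification", "challenge"].map (fun k => (k, 2))) ++
      (["address_zip_check", "postal_code_invalid"].map (fun k => (k, 3))) ++
      (["card_declined", "declined", "do_not_honor", "do not honor", "not honored"].map (fun k => (k, 4))) ++
      (["invalid_number", "invalid card", "incorrect_number"].map (fun k => (k, 5))) ++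
      (["expired_card", "expired"].map (fun k => (k, 6))) ++
      (["pickup_card", "stolen_card", "lost_card"].map (fun k => (k, 7))) := rfl

-- ===== VERDICT (by name: the statement is the Claim_ definition above) =====
theorem parse_stripe_response_spec : Claim_equal_parse_stripe_response := by
  intro response_text _
  unfold Spec_parse_stripe_response parse_stripe_response parse_stripe_response_alt
  rw [pv_table_split]
  simp only [List.foldl_append, pv_group_fold]
  generalize (["succeeded", "payment complete", "setup_intent_succeeded"].any (fun k => PySem.Str.isIn k (PySem.Str.lower response_text))) = a0
  generalize (["incorrect_cvc", "security code is incorrect"].any (fun k => PySem.Str.isIn k (PySem.Str.lower response_text))) = a1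
  generalize (["insufficient_funds", "3ds", "authentication", "otp", "verification", "challenge"].any (fun k => PySem.Str.isIn k (PySem.Str.lower response_text))) = a2
  generalize (["address_zip_check", "postal_code_invalid"].any (fun k => PySem.Str.isIn k (PySem.Str.lower response_text))) = a3
  generalize (["card_declined", "declined", "do_not_honor", "do not honor", "not honored"].any (fun k => PySem.Str.isIn k (PySem.Str.lower response_text))) = a4
  generalize (["invalid_number", "invalid card", "incorrect_number"].any (fun k => PySem.Str.isIn k (PySem.Str.lower response_text))) = a5
  generalize (["expired_card", "expired"].any (fun k => PySem.Str.isIn k (PySem.Str.lower response_text))) = a6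
  generalize (["pickup_card", "stolen_card", "lost_card"].any (fun k => PySem.Str.isIn k (PySem.Str.lower response_text))) = a7
  revert a0 a1 a2 a3 a4 a5 a6 a7
  decide
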